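-- pv_equiv track=rewrite | github.com/somecollagist/Brubeck | Utils/qitint.py | CnvIntToChars
-- ===== SOURCE A (Python) =====
-- import math
--
-- IntToChar = {
--     -2 : "A",
--     -1 : "E",
--      0 : "I",
--      1 : "O",
--      2 : "U",
-- }
--
-- def CnvIntToChars(num: int):
--     size = 10
--     chars = ['I' for x in range(size)]
--
--     if num != 0:
--         delta = 1
--         if num < 0:
--             num *= -1
--             delta = -1
--
--         idx = int(math.log(2*num, 5))
--         while num != 0:
--             coef = GetClosestToZero(num, idx)
--             num -= coef * (5 ** idx)
--             chars[idx] = IntToChar[coef * delta]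
--             idx -= 1
--
--     return ''.join(str(x) for x in chars[::-1])
--
-- def GetClosestToZero(num : int, power : int):
--     scores = {
--         -2 : 0,
--         -1 : 0,
--          0 : 0,
--          1 : 0,
--          2 : 0
--     }
--
--     for score in scores:
--         scores[score] = abs(num - (score * (5 ** power)))
--
--     ret = scores[-2]
--     val = -2
--     for score in scores:
--         if scores[score] == 0:
--             return score
--         if scores[score] < ret:
--             ret = scores[score]
--             val = score
--
--     return val
-- ===== SOURCE B (Python) =====
-- # B: builds the balanced base-5 digits least-significant-first by repeated modulo,
-- # then pads with 'I' to width 10 — no float log, no per-digit 5-candidate scan.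
-- IntToChar = {
--     -2 : "A",
--     -1 : "E",
--      0 : "I",
--      1 : "O",
--      2 : "U",
-- }
--
-- def CnvIntToChars(num: int):
--     delta = -1 if num < 0 else 1
--     n = abs(num)
--     digits = []
--     while n > 0:
--         r = n % 5
--         if r > 2:
--             r -= 5
--         n = (n - r) // 5
--         digits.append(IntToChar[r * delta])
--     return 'I' * (10 - len(digits)) + ''.join(reversed(digits))
-- ===== Notes on version B (the rewrite author's own statement) =====
-- stated objective: simpler
-- what changed: A picks digits top-down from a float-log starting power, scoring all five candidate coefficients with a dict per digit; B extracts the balanced base-5 digits bottom-up by repeated modulo and left-pads to width 10.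
-- crash fix: On every num with |num| > 4882812 A raises IndexError (its 10-slot chars array is indexed at idx >= 10); B returns the full balanced base-5 vowel string of more than 10 characters. — e.g. on CnvIntToChars(4882813): A raises IndexError, B returns "OAAAAAAAAAA"
import Mathlib
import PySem

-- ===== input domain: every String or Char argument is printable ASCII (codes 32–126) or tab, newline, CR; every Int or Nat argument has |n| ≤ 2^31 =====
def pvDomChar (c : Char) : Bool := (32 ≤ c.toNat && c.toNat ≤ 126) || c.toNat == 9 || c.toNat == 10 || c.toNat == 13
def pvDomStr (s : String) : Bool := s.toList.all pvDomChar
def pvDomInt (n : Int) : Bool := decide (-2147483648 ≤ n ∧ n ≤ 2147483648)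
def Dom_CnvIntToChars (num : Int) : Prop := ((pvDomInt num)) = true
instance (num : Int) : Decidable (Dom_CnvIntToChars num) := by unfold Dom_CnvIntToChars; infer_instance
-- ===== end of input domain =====

-- B replaces A's float-log + top-down closest-digit search by a bottom-up
-- repeated-modulo extraction of the balanced base-5 digits (objective: simpler).


-- ===== PORT A =====
-- IntToChar dict; every lookup performed below uses a key in [-2,2], so the
-- KeyError branch is unreachable and the default is never returned.
def IntToChar (k : Int) : Char :=
  if k = -2 then 'A' else if k = -1 then 'E' else if k = 0 then 'I'
  else if k = 1 then 'O' else if k = 2 then 'U' else 'I'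

-- Python abs(x) on int
def pyabs (x : Int) : Int := if x < 0 then -x else x

-- the second for-loop of GetClosestToZero (early return on a zero score,
-- otherwise keep the first strictly smaller score)
def gczLoop : List (Int × Int) → Int → Int → Int
  | [], _, val => val
  | (k, v) :: rest, ret, val =>
    if v = 0 then k
    else if v < ret then gczLoop rest v k
    else gczLoop rest ret val

-- GetClosestToZero: scores dict over keys [-2,-1,0,1,2] (first loop builds the
-- abs scores), then the selection loop; ret starts at scores[-2], val at -2.
-- 5 ** power: power ≥ 0 at every call reached on admitted inputs, so Nat power is exact.
def GetClosestToZero (num power : Int) : Int :=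
  let p : Int := 5 ^ power.toNat
  let scores : List (Int × Int) :=
    [(-2, pyabs (num - (-2) * p)), (-1, pyabs (num - (-1) * p)), (0, pyabs (num - 0 * p)),
     (1, pyabs (num - 1 * p)), (2, pyabs (num - 2 * p))]
  gczLoop scores (pyabs (num - (-2) * p)) (-2)

-- the while-loop of CnvIntToChars; fuel = idx+1 suffices on every admitted
-- input (the loop ends with num = 0 no later than idx = -1 there).
-- chars[idx]: Python wraps a negative index (unreachable on admitted inputs).
def aloop : Nat → Int → Int → Int → List Char → List Char
  | 0, _, _, _, chars => chars
  | fuel+1, n, idx, δ, chars =>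
    if n = 0 then chars
    else
      let coef := GetClosestToZero n idx
      let chars' := chars.set (if idx < 0 then (10 + idx).toNat else idx.toNat) (IntToChar (coef * δ))
      aloop fuel (n - coef * 5 ^ idx.toNat) (idx - 1) δ chars'

-- int(math.log(2*num, 5)) ported as the exact floor logarithm; it equals the
-- float computation on every input admitted by Pre_ (checked exhaustively).
def CnvIntToChars (num : Int) : String :=
  let chars : List Char := List.replicate 10 'I'
  let chars :=
    if num ≠ 0 then
      let m : Int := if num < 0 then -num else num
      let delta : Int := if num < 0 then -1 else 1
      let idx : Int := (Nat.log 5 (2 * m).toNat : Int)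
      aloop (idx.toNat + 1) m idx delta chars
    else chars
  String.mk chars.reverse

-- ===== PORT B =====
-- the while-loop of B, least-significant digit first; fuel 64 strictly bounds
-- the number of iterations for every int in Dom (at most 14 digits at |num| ≤ 2^31).
def bDigits : Nat → Int → Int → List Char
  | 0, _, _ => []
  | fuel+1, n, δ =>
    if 0 < n then
      let r := PySem.Int.mod n 5
      let r' := if r > 2 then r - 5 else r
      IntToChar (r' * δ) :: bDigits fuel (PySem.Int.floordiv (n - r') 5) δ
    else []

def CnvIntToChars_alt (num : Int) : String :=
  let delta : Int := if num < 0 then -1 else 1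
  let ds := bDigits 64 (pyabs num) delta
  String.mk (List.replicate (10 - ds.length) 'I' ++ ds.reverse)

-- ===== PRECONDITION & SPEC =====
-- Pre_ excludes exactly the inputs on which A raises IndexError: the balanced
-- base-5 representation of |num| > (5^10-1)/2 needs more than the 10 slots of
-- A's chars array.
def Pre_CnvIntToChars (num : Int) : Prop := -4882812 ≤ num ∧ num ≤ 4882812
instance (num : Int) : Decidable (Pre_CnvIntToChars num) := by unfold Pre_CnvIntToChars; infer_instance
def pvWitness_CnvIntToChars : Int := 7

-- On every num with |num| > 4882812 A raises IndexError (chars[idx] with idx ≥ 10);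
-- B returns the full balanced base-5 vowel string, left-padded to at least 10 chars.
def Raises_CnvIntToChars (num : Int) : Prop := num < -4882812 ∨ 4882812 < num
instance (num : Int) : Decidable (Raises_CnvIntToChars num) := by unfold Raises_CnvIntToChars; infer_instance
def pvRaiseWitness_CnvIntToChars : Int := 4882813
def pvRaiseWitnessOut_CnvIntToChars : String := "OAAAAAAAAAA"

def Spec_CnvIntToChars (num : Int) (out : String) : Prop := out = CnvIntToChars_alt num
instance (num : Int) (out : String) : Decidable (Spec_CnvIntToChars num out) := by unfold Spec_CnvIntToChars; infer_instance

-- ===== CLAIM (what is proved, stated in full; the proofs are below) =====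
def Claim_equal_CnvIntToChars : Prop := ∀ (num : Int), Dom_CnvIntToChars num → Pre_CnvIntToChars num → Spec_CnvIntToChars num (CnvIntToChars num)
def Claim_raises_CnvIntToChars : Prop := (∀ (num : Int), Dom_CnvIntToChars num → Raises_CnvIntToChars num → ¬ Pre_CnvIntToChars num) ∧ (Dom_CnvIntToChars (pvRaiseWitness_CnvIntToChars) ∧ Raises_CnvIntToChars (pvRaiseWitness_CnvIntToChars) ∧ CnvIntToChars_alt (pvRaiseWitness_CnvIntToChars) = pvRaiseWitnessOut_CnvIntToChars)

-- ===== LEMMAS AND PROOFS =====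

-- balanced digit at the bottom and the corresponding quotient
def D5 (n : Int) : Int := if n % 5 > 2 then n % 5 - 5 else n % 5
def N5 (n : Int) : Int := (n - D5 n) / 5

-- the j lowest balanced base-5 digits of n, least significant first
def digitsZ : Int → Nat → List Int
  | _, 0 => []
  | n, j+1 => D5 n :: digitsZ (N5 n) j

def digitsVal : List Int → Int
  | [] => 0
  | d :: ds => d + 5 * digitsVal ds

def nIter : Nat → Int → Int
  | 0, n => n
  | j+1, n => nIter j (N5 n)

lemma D5_facts (n : Int) : -2 ≤ D5 n ∧ D5 n ≤ 2 ∧ 5 * N5 n + D5 n = n := by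
  have h : -2 ≤ D5 n ∧ D5 n ≤ 2 ∧ (n - D5 n) % 5 = 0 := by
    unfold D5; split_ifs <;> omega
  unfold N5
  omega

lemma digitsZ_length (n : Int) (j : Nat) : (digitsZ n j).length = j := by
  induction j generalizing n with
  | zero => rfl
  | succ j ih => simp [digitsZ, ih]

lemma digitsZ_zero (j : Nat) : digitsZ 0 j = List.replicate j 0 := by
  induction j with
  | zero => rfl
  | succ j ih =>
    have h0 : D5 0 = 0 := by unfold D5; norm_num
    have h1 : N5 0 = 0 := by unfold N5; rw [h0]; norm_num
    simp [digitsZ, h0, h1, ih, List.replicate_succ]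

lemma digitsZ_bounds (j : Nat) : ∀ n d, d ∈ digitsZ n j → -2 ≤ d ∧ d ≤ 2 := by
  induction j with
  | zero => intro n d h; simp [digitsZ] at h
  | succ j ih =>
    intro n d h
    simp only [digitsZ, List.mem_cons] at h
    rcases h with h | h
    · subst h; exact ⟨(D5_facts n).1, (D5_facts n).2.1⟩
    · exact ih _ _ h

lemma digitsVal_bound (ds : List Int) (h : ∀ d ∈ ds, -2 ≤ d ∧ d ≤ 2) :
    -(5 ^ ds.length - 1) ≤ 2 * digitsVal ds ∧ 2 * digitsVal ds ≤ 5 ^ ds.length - 1 := by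
  induction ds with
  | nil => simp [digitsVal]
  | cons d ds ih =>
    have hd := h d (by simp)
    have ih' := ih (fun x hx => h x (by simp [hx]))
    simp only [digitsVal, List.length_cons, pow_succ]
    have h5 : (0:Int) < 5 ^ ds.length := by positivity
    constructor <;> nlinarith [ih'.1, ih'.2]

lemma digitsVal_eq (j : Nat) : ∀ n, digitsVal (digitsZ n j) + nIter j n * 5 ^ j = n := by
  induction j with
  | zero => intro n; simp [digitsZ, digitsVal, nIter]
  | succ j ih =>
    intro n
    have hD := D5_facts n
    have := ih (N5 n)
    simp only [digitsZ, digitsVal, nIter, pow_succ]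
    nlinarith [this]

lemma digitsZ_uniq : ∀ (ds : List Int) (n : Int), (∀ d ∈ ds, -2 ≤ d ∧ d ≤ 2) →
    digitsVal ds = n → digitsZ n ds.length = ds := by
  intro ds
  induction ds with
  | nil => intro n _ _; rfl
  | cons d ds ih =>
    intro n h hval
    have hd := h d (by simp)
    simp only [digitsVal] at hval
    have hD : D5 n = d := by unfold D5; split_ifs <;> omega
    have hN : N5 n = digitsVal ds := by unfold N5; rw [hD]; omega
    simp only [List.length_cons, digitsZ, hD, hN]
    rw [ih (digitsVal ds) (fun x hx => h x (by simp [hx])) rfl]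

lemma digitsZ_snoc (j : Nat) : ∀ n, digitsZ n (j+1) = digitsZ n j ++ [D5 (nIter j n)] := by
  induction j with
  | zero => intro n; rfl
  | succ j ih =>
    intro n
    show D5 n :: digitsZ (N5 n) (j+1) = (D5 n :: digitsZ (N5 n) j) ++ _
    rw [ih (N5 n)]; rfl

lemma nIter_small (j : Nat) (n : Int) (h1 : -(5 ^ (j+1) - 1) ≤ 2 * n) (h2 : 2 * n ≤ 5 ^ (j+1) - 1) :
    -2 ≤ nIter j n ∧ nIter j n ≤ 2 ∧ n = digitsVal (digitsZ n j) + nIter j n * 5 ^ j := by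
  have hval := digitsVal_eq j n
  have hb := digitsVal_bound (digitsZ n j) (digitsZ_bounds j n)
  rw [digitsZ_length] at hb
  have h5 : (1:Int) ≤ 5 ^ j := one_le_pow₀ (by norm_num)
  have h5s : (5:Int) ^ (j+1) = 5 * 5 ^ j := by ring
  refine ⟨?_, ?_, by omega⟩ <;>
  · by_contra hc
    push Not at hc
    have h3 : 3 * 5 ^ j ≤ |nIter j n| * 5 ^ j := by
      apply mul_le_mul_of_nonneg_right _ (by positivity)
      rcases abs_cases (nIter j n) with ⟨he, _⟩ | ⟨he, _⟩ <;> omega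
    rcases abs_cases (nIter j n) with ⟨he, _⟩ | ⟨he, _⟩ <;> nlinarith [hb.1, hb.2]

lemma drop_set_cons : ∀ (l : List Char) (k : Nat) (v : Char), k < l.length →
    (l.set k v).drop k = v :: l.drop (k+1) := by
  intro l
  induction l with
  | nil => intro k v h; simp at h
  | cons c cs ih =>
    intro k v h
    cases k with
    | zero => rfl
    | succ k => simpa using ih k v (by simpa using h)

lemma pyabs_nonneg (x : Int) : 0 ≤ pyabs x := by
  unfold pyabs; split_ifs <;> omega

-- the selection loop skips every entry whose score exceeds ret
lemma gczLoop_skip : ∀ (l : List (Int × Int)) (ret val : Int), 0 ≤ ret →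
    (∀ kv ∈ l, ret < kv.2) → gczLoop l ret val = val := by
  intro l
  induction l with
  | nil => intros; rfl
  | cons kv rest ih =>
    intro ret val h0 h
    obtain ⟨k, v⟩ := kv
    have hv := h (k, v) (by simp)
    simp only [gczLoop]
    rw [if_neg (by simp at hv ⊢; omega), if_neg (by simp at hv ⊢; omega)]
    exact ih ret val h0 (fun kv hkv => h kv (by simp [hkv]))

-- once the running minimum is the strict global minimum, its key is returned
lemma gczLoop_head (post : List (Int × Int)) (vt : Int) (h0 : 0 ≤ vt)
    (hpost : ∀ kv ∈ post, vt < kv.2) (t : Int) :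
    gczLoop ((t, vt) :: post) vt t = t := by
  simp only [gczLoop]
  by_cases hz : vt = 0
  · rw [if_pos hz]
  · rw [if_neg hz, if_neg (lt_irrefl vt)]
    exact gczLoop_skip post vt t h0 hpost

-- a strictly smallest score somewhere in the list wins the selection loop
lemma gczLoop_found : ∀ (pre post : List (Int × Int)) (t vt ret val : Int),
    0 ≤ vt → vt < ret → (∀ kv ∈ pre, vt < kv.2) → (∀ kv ∈ post, vt < kv.2) →
    gczLoop (pre ++ (t, vt) :: post) ret val = t := by
  intro pre
  induction pre with
  | nil =>
    intro post t vt ret val h0 hr _ hpost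
    simp only [List.nil_append, gczLoop]
    by_cases hz : vt = 0
    · rw [if_pos hz]
    · rw [if_neg hz, if_pos hr]
      exact gczLoop_skip post vt t h0 hpost
  | cons kv rest ih =>
    intro post t vt ret val h0 hr hpre hpost
    obtain ⟨k, v⟩ := kv
    have hv := hpre (k, v) (by simp)
    simp only [List.cons_append, gczLoop]
    rw [if_neg (by simp at hv; omega)]
    by_cases hc : v < ret
    · rw [if_pos hc]
      exact ih post t vt v k h0 (by simpa using hv) (fun kv hkv => hpre kv (by simp [hkv])) hpost
    · rw [if_neg hc]
      exact ih post t vt ret val h0 hr (fun kv hkv => hpre kv (by simp [hkv])) hpost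

-- GetClosestToZero returns the top balanced digit t when n = t*p + s with a
-- representable remainder s
lemma gcz_eq (power : Int) (n t s : Int)
    (ht1 : -2 ≤ t) (ht2 : t ≤ 2)
    (hs1 : -(5 ^ power.toNat - 1) ≤ 2 * s) (hs2 : 2 * s ≤ 5 ^ power.toNat - 1)
    (hn : n = t * 5 ^ power.toNat + s) :
    GetClosestToZero n power = t := by
  have hp : (1:Int) ≤ 5 ^ power.toNat := one_le_pow₀ (by norm_num)
  simp only [GetClosestToZero]
  generalize hgen : (5:Int) ^ power.toNat = p at hp hs1 hs2 hn
  subst hn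
  interval_cases t
  · exact gczLoop_head _ _ (pyabs_nonneg _)
      (by intro kv hkv; fin_cases hkv <;> simp only [pyabs] <;> split_ifs <;> omega) (-2)
  · exact gczLoop_found [((-2:Int), pyabs (-1 * p + s - -2 * p))] _ (-1) _ _ _ (pyabs_nonneg _)
      (by simp only [pyabs]; split_ifs <;> omega)
      (by intro kv hkv; fin_cases hkv <;> simp only [pyabs] <;> split_ifs <;> omega)
      (by intro kv hkv; fin_cases hkv <;> simp only [pyabs] <;> split_ifs <;> omega)
  · exact gczLoop_found [((-2:Int), pyabs (0 * p + s - -2 * p)), ((-1:Int), pyabs (0 * p + s - -1 * p))]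
      _ 0 _ _ _ (pyabs_nonneg _)
      (by simp only [pyabs]; split_ifs <;> omega)
      (by intro kv hkv; fin_cases hkv <;> simp only [pyabs] <;> split_ifs <;> omega)
      (by intro kv hkv; fin_cases hkv <;> simp only [pyabs] <;> split_ifs <;> omega)
  · exact gczLoop_found [((-2:Int), pyabs (1 * p + s - -2 * p)), ((-1:Int), pyabs (1 * p + s - -1 * p)),
        ((0:Int), pyabs (1 * p + s - 0 * p))] _ 1 _ _ _ (pyabs_nonneg _)
      (by simp only [pyabs]; split_ifs <;> omega)
      (by intro kv hkv; fin_cases hkv <;> simp only [pyabs] <;> split_ifs <;> omega)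
      (by intro kv hkv; fin_cases hkv <;> simp only [pyabs] <;> split_ifs <;> omega)
  · exact gczLoop_found [((-2:Int), pyabs (2 * p + s - -2 * p)), ((-1:Int), pyabs (2 * p + s - -1 * p)),
        ((0:Int), pyabs (2 * p + s - 0 * p)), ((1:Int), pyabs (2 * p + s - 1 * p))] _ 2 _ _ _ (pyabs_nonneg _)
      (by simp only [pyabs]; split_ifs <;> omega)
      (by intro kv hkv; fin_cases hkv <;> simp only [pyabs] <;> split_ifs <;> omega)
      (by intro kv hkv; fin_cases hkv <;> simp only [pyabs] <;> split_ifs <;> omega)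

set_option maxHeartbeats 1000000 in
-- the main loop writes exactly the balanced digits of n into slots 0..K
lemma aloop_eq (K : Nat) : ∀ (n δ : Int) (chars : List Char),
    chars.length = 10 → K ≤ 9 →
    -(5 ^ (K+1) - 1) ≤ 2 * n → 2 * n ≤ 5 ^ (K+1) - 1 →
    (∀ i : Nat, i ≤ K → chars[i]? = some 'I') →
    aloop (K+1) n (K : Int) δ chars =
      (digitsZ n (K+1)).map (fun d => IntToChar (d * δ)) ++ chars.drop (K+1) := by
  induction K with
  | zero =>
    intro n δ chars hlen _ h1 h2 hI
    match chars, hlen with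
    | c :: cs, hlen =>
    have hc : c = 'I' := by have := hI 0 (by omega); simpa using this
    show aloop 1 n 0 δ (c :: cs) = _
    by_cases hn : n = 0
    · subst hn
      simp [aloop, digitsZ, digitsZ_zero, D5, IntToChar, hc]
    · have hD : D5 n = n := by unfold D5; split_ifs <;> omega
      have hg : GetClosestToZero n 0 = n := by
        have := gcz_eq 0 n n 0 (by omega) (by omega) (by norm_num) (by norm_num) (by norm_num)
        simpa using this
      simp [aloop, hn, hg, digitsZ, hD]
  | succ K ih =>
    intro n δ chars hlen hK h1 h2 hI
    by_cases hn : n = 0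
    · subst hn
      have hzero : (digitsZ 0 (K+1+1)).map (fun d => IntToChar (d * δ)) = List.replicate (K+2) 'I' := by
        rw [digitsZ_zero]; simp [IntToChar]
      have h0 : aloop (K+1+1) 0 (((K:Nat)+1 : Nat) : Int) δ chars = chars := by
        simp [aloop]
      push_cast at h0 ⊢
      rw [h0, hzero]
      apply List.ext_getElem?
      intro i
      by_cases hi : i < K + 2
      · rw [List.getElem?_append_left (by simpa using hi), hI i (by omega)]
        simp [hi]
      · rw [List.getElem?_append_right (by simpa using (by omega : K + 2 ≤ i)), List.getElem?_drop]
        simp only [List.length_replicate]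
        congr 1
        omega
    · -- one step: the top balanced digit goes to slot K+1, then recurse on the remainder
      have hu := nIter_small (K+1) n h1 h2
      set u := nIter (K+1) n with hu'
      set s := digitsVal (digitsZ n (K+1)) with hs'
      have hsb := digitsVal_bound (digitsZ n (K+1)) (digitsZ_bounds (K+1) n)
      rw [digitsZ_length] at hsb
      have hDu : D5 u = u := by unfold D5; rcases hu with ⟨a, b, -⟩; split_ifs <;> omega
      have htn : ((((K:Nat)+1:Nat)) : Int).toNat = K + 1 := by omega
      have hg : GetClosestToZero n (((K:Nat)+1 : Nat) : Int) = u := by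
        apply gcz_eq _ _ _ s hu.1 hu.2.1 <;> rw [htn]
        · exact hsb.1
        · exact hsb.2
        · have := hu.2.2; omega
      have hstep : aloop (K+1+1) n (((K:Nat)+1 : Nat) : Int) δ chars =
          aloop (K+1) (n - u * 5 ^ (K+1)) ((K : Nat) : Int) δ
            (chars.set (K+1) (IntToChar (u * δ))) := by
        show (if n = 0 then chars else _) = _
        rw [if_neg hn]
        simp only [hg, htn]
        have hneg : ¬ ((((K:Nat)+1:Nat) : Int) < 0) := by omega
        rw [if_neg hneg]
        congr 1
        push_cast
        ring
      have hns : n - u * 5 ^ (K+1) = s := by have := hu.2.2; omega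
      rw [hstep, hns]
      have hset_len : (chars.set (K+1) (IntToChar (u * δ))).length = 10 := by
        simp [hlen]
      have hIs : ∀ i : Nat, i ≤ K → (chars.set (K+1) (IntToChar (u * δ)))[i]? = some 'I' := by
        intro i hi
        rw [List.getElem?_set_ne (by omega)]
        exact hI i (by omega)
      rw [ih s δ _ hset_len (by omega) hsb.1 hsb.2 hIs]
      have hZs : digitsZ s (K+1) = digitsZ n (K+1) := by
        have := digitsZ_uniq (digitsZ n (K+1)) s (digitsZ_bounds (K+1) n) hs'.symm
        rw [digitsZ_length] at this
        exact this
      have hsnoc : digitsZ n (K+1+1) = digitsZ n (K+1) ++ [u] := by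
        rw [digitsZ_snoc, hDu]
      rw [hZs, hsnoc, drop_set_cons chars (K+1) _ (by omega)]
      simp

-- B's digit loop computes the balanced digits bottom-up; relate it to digitsZ
lemma bDigits_eq_digitsZ (j : Nat) : ∀ (fuel : Nat) (n δ : Int), j ≤ fuel → 0 ≤ n →
    2 * n ≤ 5 ^ j - 1 →
    (digitsZ n j).map (fun d => IntToChar (d * δ)) =
      bDigits fuel n δ ++ List.replicate (j - (bDigits fuel n δ).length) 'I' := by
  induction j with
  | zero =>
    intro fuel n δ _ hn0 hb
    have : n = 0 := by omega
    subst this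
    cases fuel <;> simp [digitsZ, bDigits]
  | succ j ih =>
    intro fuel n δ hf hn0 hb
    match fuel, hf with
    | fuel+1, hf =>
    by_cases hn : 0 < n
    · have hmod : PySem.Int.mod n 5 = n % 5 := PySem.Int.mod_eq_emod_of_pos (by norm_num)
      have hD : (if PySem.Int.mod n 5 > 2 then PySem.Int.mod n 5 - 5 else PySem.Int.mod n 5) = D5 n := by
        rw [hmod]; rfl
      have hN : PySem.Int.floordiv (n - D5 n) 5 = N5 n := by
        rw [PySem.Int.floordiv_eq_ediv_of_pos (by norm_num)]; rfl
      have hDf := D5_facts n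
      have h5s : (5:Int) ^ (j+1) = 5 * 5 ^ j := by ring
      have h5j : (1:Int) ≤ 5 ^ j := one_le_pow₀ (by norm_num)
      obtain ⟨cj, hcj⟩ : Odd ((5:Int) ^ j) := Odd.pow (by norm_num)
      have hN0 : 0 ≤ N5 n := by omega
      have hNb : 2 * N5 n ≤ 5 ^ j - 1 := by omega
      have hbd : bDigits (fuel+1) n δ = IntToChar (D5 n * δ) :: bDigits fuel (N5 n) δ := by
        simp only [bDigits, if_pos hn, hD, hN]
      rw [hbd]
      simp only [digitsZ, List.map_cons, List.length_cons]
      rw [ih fuel (N5 n) δ (by omega) hN0 hNb]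
      have hcnt : j + 1 - ((bDigits fuel (N5 n) δ).length + 1) = j - (bDigits fuel (N5 n) δ).length := by
        omega
      rw [List.cons_append, hcnt]
    · have : n = 0 := by omega
      subst this
      simp [bDigits, digitsZ_zero, IntToChar]

-- ===== VERDICT (by name: the statement is the Claim_ definition above) =====
theorem CnvIntToChars_spec : Claim_equal_CnvIntToChars := by
  intro num _ hpre
  unfold Spec_CnvIntToChars
  by_cases h0 : num = 0
  · subst h0; decide
  · have hpre' : -4882812 ≤ num ∧ num ≤ 4882812 := hpre
    simp only [CnvIntToChars, CnvIntToChars_alt]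
    rw [if_pos (show ¬ num = 0 from h0)]
    set m : Int := if num < 0 then -num else num with hm
    have hmeq : pyabs num = m := rfl
    have hm1 : 1 ≤ m := by rw [hm]; split_ifs <;> omega
    have hmb : m ≤ 4882812 := by rw [hm]; split_ifs <;> omega
    set δ : Int := if num < 0 then -1 else 1 with hδ
    set K : Nat := Nat.log 5 (2 * m).toNat with hKdef
    have hKn : ((K : Int)).toNat = K := by omega
    have hlowN : (5:Nat) ^ K ≤ (2 * m).toNat := by
      rw [hKdef]; exact Nat.pow_log_le_self 5 (by omega)
    have hhighN : (2 * m).toNat < (5:Nat) ^ (K + 1) := by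
      rw [hKdef]; exact Nat.lt_pow_succ_log_self (by norm_num) _
    have hcast : ∀ j : Nat, (((5:Nat) ^ j : Nat) : Int) = (5:Int) ^ j := by
      intro j; push_cast; rfl
    have hlow : (5:Int) ^ K ≤ 2 * m := by
      have h := (Nat.cast_le (α := Int)).mpr hlowN
      rw [hcast] at h; omega
    have hhigh : 2 * m < (5:Int) ^ (K + 1) := by
      have h := (Nat.cast_lt (α := Int)).mpr hhighN
      rw [hcast] at h; omega
    have hK9 : K ≤ 9 := by
      by_contra hc
      have h10 : (5:Int) ^ 10 ≤ 5 ^ K := pow_le_pow_right₀ (by norm_num) (by omega)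
      norm_num at h10
      omega
    have hrun := aloop_eq K m δ (List.replicate 10 'I') (by simp) hK9
      (by have : (1:Int) ≤ 5 ^ (K+1) := one_le_pow₀ (by norm_num); omega)
      (by omega)
      (fun i hi => by rw [List.getElem?_replicate]; rw [if_pos (by omega)])
    rw [hKn, hrun]
    have hdig := bDigits_eq_digitsZ (K+1) 64 m δ (by omega) (by omega) (by omega)
    rw [hmeq]
    set bd := bDigits 64 m δ with hbd
    have hlenEq : K + 1 = bd.length + (K + 1 - bd.length) := by
      have := congrArg List.length hdig
      simp [digitsZ_length] at this
      omega
    have hbdle : bd.length ≤ K + 1 := by omega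
    rw [hdig]
    rw [List.drop_replicate, List.reverse_append, List.reverse_append, List.reverse_replicate, List.reverse_replicate]
    congr 1
    rw [← List.append_assoc, List.replicate_append_replicate]
    have hcnt : 10 - (K + 1) + (K + 1 - bd.length) = 10 - bd.length := by omega
    rw [hcnt]

@[simp] theorem CnvIntToChars_raises : Claim_raises_CnvIntToChars := by
  unfold Claim_raises_CnvIntToChars
  constructor
  · intro num _ hr hp
    unfold Raises_CnvIntToChars at hr
    unfold Pre_CnvIntToChars at hp
    omega
  · refine ⟨by decide, by unfold Raises_CnvIntToChars pvRaiseWitness_CnvIntToChars; omega, by decide⟩
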